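-- pv_equiv track=rewrite | github.com/YH-edenbro/SSAFY_APS | py/string1.py | equal_char
-- ===== SOURCE A (Python) =====
-- def equal_char(s1, s2):
--
--     N = len(s2)
--     most_char = 0
--
--     for char in s1:  # s1 문자열을 순회해서 1글자씩 꺼내기
--         char_count = 0  # 꺼낸 char의 개수 카운트
--         for i in range(N):  # s2 순회하면서 char와 비교
--             if s2[i] == char:
--                 char_count += 1
--                 # s2 순회가 끝나고 최종 char_count와 most_char비교해서 최대값 구하기
--             most_char = max(char_count, most_char)
--
--     return most_char
-- ===== SOURCE B (Python) =====
-- def equal_char(s1, s2):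
--     present = set(s1)
--     best = 0
--     prev = None
--     run = 0
--     for ch in sorted(s2):
--         run = run + 1 if ch == prev else 1
--         prev = ch
--         if ch in present and run > best:
--             best = run
--     return best
-- ===== Notes on version B (the rewrite author's own statement) =====
-- stated objective: faster
-- what changed: Instead of rescanning s2 for every character of s1, B sorts s2 once and walks it in a single run-length scan, updating the best run length for characters present in set(s1).
import Mathlib
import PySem

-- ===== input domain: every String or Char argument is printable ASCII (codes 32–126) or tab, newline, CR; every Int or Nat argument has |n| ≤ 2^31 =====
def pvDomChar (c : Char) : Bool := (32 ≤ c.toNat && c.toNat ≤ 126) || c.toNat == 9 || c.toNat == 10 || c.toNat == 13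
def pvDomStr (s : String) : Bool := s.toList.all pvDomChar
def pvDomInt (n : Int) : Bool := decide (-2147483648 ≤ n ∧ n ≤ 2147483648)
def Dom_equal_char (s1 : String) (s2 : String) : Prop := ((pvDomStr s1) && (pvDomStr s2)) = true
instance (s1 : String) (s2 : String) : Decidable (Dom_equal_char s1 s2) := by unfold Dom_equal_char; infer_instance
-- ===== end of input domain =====

-- B sorts s2 once and does a single run-length scan over the sorted copy (best run of a char present in
-- set(s1)), replacing A's full rescan of s2 for every character of s1 (faster).

-- ===== PORT A =====
-- for char in s1: char_count = 0; for i in range(N): if s2[i]==char: count+=1; most = max(count, most)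
def equal_char (s1 : String) (s2 : String) : Int :=
  let N : Int := PySem.Str.len s2
  s1.toList.foldl
    (fun most_char ch =>
      ((PySem.List.pyRange 0 N 1).foldl
        (fun (st : Int × Int) i =>
          let cc := if PySem.List.pyGetD s2.toList i ' ' == ch then st.1 + 1 else st.1
          (cc, max cc st.2))
        (0, most_char)).2)
    0

-- ===== PORT B =====
-- present = set(s1); best = 0; prev = None; run = 0
-- for ch in sorted(s2): run = run+1 if ch==prev else 1; prev = ch; if ch in present and run > best: best = run
def equal_char_alt (s1 : String) (s2 : String) : Int :=
  let present : PySem.Set Char := PySem.Set.ofList s1.toList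
  ((PySem.List.sorted s2.toList (fun c => c) false).foldl
    (fun (st : Int × Option Char × Int) ch =>
      let run : Int := if st.2.1 = some ch then st.2.2 + 1 else 1
      let best : Int := if PySem.Set.contains present ch = true ∧ run > st.1 then run else st.1
      (best, some ch, run))
    (0, none, 0)).1

-- ===== PRECONDITION & SPEC =====
def Spec_equal_char (s1 : String) (s2 : String) (out : Int) : Prop := out = equal_char_alt s1 s2
instance (s1 : String) (s2 : String) (out : Int) : Decidable (Spec_equal_char s1 s2 out) := by unfold Spec_equal_char; infer_instance

-- ===== CLAIM (what is proved, stated in full; the proofs are below) =====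
def Claim_equal_equal_char : Prop := ∀ (s1 : String) (s2 : String), Dom_equal_char s1 s2 → Spec_equal_char s1 s2 (equal_char s1 s2)

-- ===== LEMMAS AND PROOFS =====

-- max algebra helpers
theorem pv_max_absorb (a b c : Int) (h : b ≤ c) : max (max a b) c = max a c := by
  rw [max_assoc, max_eq_right h]

theorem pv_max_drop (a b c : Int) (h : b ≤ a) : max a (max b c) = max a c := by
  rw [← max_assoc, max_eq_left h]

-- A's inner loop over s2's characters: with c0 ≤ m it ends at (c0 + count, max m (c0 + count)).
theorem pv_inner_count (ch : Char) (l : List Char) :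
    ∀ (c0 m : Int), c0 ≤ m →
      l.foldl (fun (st : Int × Int) c =>
          let cc := if c == ch then st.1 + 1 else st.1
          (cc, max cc st.2)) (c0, m)
        = (c0 + (l.count ch : Int), max m (c0 + (l.count ch : Int))) := by
  induction l with
  | nil =>
    intro c0 m h
    simp [max_eq_left h]
  | cons x xs ih =>
    intro c0 m h
    by_cases hx : x == ch
    · have : (x :: xs).count ch = xs.count ch + 1 := by
        simp [List.count_cons, hx]
      rw [this]
      simp only [List.foldl_cons, hx, if_pos]
      rw [ih (c0 + 1) (max (c0 + 1) m) (le_max_left _ _)]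
      simp only [Prod.mk.injEq]
      push_cast
      constructor <;> omega
    · have : (x :: xs).count ch = xs.count ch := by
        simp [List.count_cons, hx]
      rw [this]
      simp only [List.foldl_cons, hx, if_neg, Bool.false_eq_true, not_false_iff]
      rw [ih c0 (max c0 m) (le_max_left _ _)]
      rw [max_eq_right h]

-- A's outer loop is a fold of 'max with the count of ch in s2' over s1, for any nonneg start.
theorem pv_outer (s2chars : List Char) :
    ∀ (l : List Char) (m : Int), 0 ≤ m →
      l.foldl (fun most_char ch =>
          ((PySem.List.pyRange 0 (s2chars.length : Int) 1).foldl
            (fun (st : Int × Int) i =>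
              let cc := if PySem.List.pyGetD s2chars i ' ' == ch then st.1 + 1 else st.1
              (cc, max cc st.2)) (0, most_char)).2) m
        = l.foldl (fun best ch => max best ((s2chars.count ch : Int))) m := by
  intro l
  induction l with
  | nil => intro m _; rfl
  | cons x xs ih =>
    intro m hm
    simp only [List.foldl_cons]
    rw [PySem.List.foldl_pyRange_zero_pyGetD' s2chars ' '
          (fun (st : Int × Int) c =>
            let cc := if c == x then st.1 + 1 else st.1
            (cc, max cc st.2)) (0, m)]
    rw [pv_inner_count x s2chars 0 m hm]
    simp only [zero_add]
    exact ih _ (le_trans hm (le_max_left _ _))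

-- the maximum, over the runs of the sorted scan (peeled one distinct char at a time),
-- of the run length of chars belonging to pres
def pvRunMax (pres : List Char) : List Char → Int
  | [] => 0
  | y :: ys =>
      max (if y ∈ pres then (1 + (ys.count y : Int)) else 0)
          (pvRunMax pres (ys.filter (fun z => z ≠ y)))
termination_by l => l.length
decreasing_by
  simp only [List.length_unattach, List.length_cons]
  refine Nat.lt_succ_of_le (le_trans (List.length_filter_le _ _) ?_)
  simp

theorem pvRunMax_nil (pres : List Char) : pvRunMax pres [] = 0 := by rw [pvRunMax]

theorem pvRunMax_cons (pres : List Char) (y : Char) (ys : List Char) :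
    pvRunMax pres (y :: ys)
      = max (if y ∈ pres then (1 + (ys.count y : Int)) else 0)
            (pvRunMax pres (ys.filter (fun z => z ≠ y))) := by rw [pvRunMax]

-- B's step function (the fold body of equal_char_alt, with pres the distinct chars of s1)
def pvStep (pres : List Char) (st : Int × Option Char × Int) (ch : Char) : Int × Option Char × Int :=
  let run : Int := if st.2.1 = some ch then st.2.2 + 1 else 1
  let best : Int := if PySem.Set.contains pres ch = true ∧ run > st.1 then run else st.1
  (best, some ch, run)

theorem pvRunMax_nonneg (pres : List Char) : ∀ l, 0 ≤ pvRunMax pres l := by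
  suffices h : ∀ (n : Nat) (l : List Char), l.length ≤ n → 0 ≤ pvRunMax pres l from
    fun l => h l.length l le_rfl
  intro n
  induction n with
  | zero =>
    intro l hl
    rw [List.length_eq_zero_iff.mp (Nat.le_zero.mp hl), pvRunMax_nil]
  | succ n ihn =>
    intro l hl
    match l with
    | [] => rw [pvRunMax_nil]
    | y :: ys =>
      rw [pvRunMax_cons]
      refine le_trans (ihn _ ?_) (le_max_right _ _)
      simp only [List.length_cons] at hl
      exact le_trans (List.length_filter_le _ _) (by omega)

theorem pvRunMax_ge (pres : List Char) :
    ∀ l, ∀ ch ∈ l, ch ∈ pres → (l.count ch : Int) ≤ pvRunMax pres l := by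
  suffices h : ∀ (n : Nat) (l : List Char), l.length ≤ n →
      ∀ ch ∈ l, ch ∈ pres → (l.count ch : Int) ≤ pvRunMax pres l from
    fun l => h l.length l le_rfl
  intro n
  induction n with
  | zero =>
    intro l hl
    rw [List.length_eq_zero_iff.mp (Nat.le_zero.mp hl)]
    intro ch h; simp at h
  | succ n ihn =>
    intro l hl
    match l with
    | [] => intro ch h; simp at h
    | y :: ys =>
      intro ch hmem hpres
      rw [pvRunMax_cons]
      by_cases hy : ch = y
      · subst hy
        refine le_trans ?_ (le_max_left _ _)
        rw [if_pos hpres, List.count_cons_self]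
        push_cast; omega
      · have h : ch ∈ ys := (List.mem_cons.mp hmem).resolve_left hy
        refine le_trans ?_ (le_max_right _ _)
        have hcnt : (ys.filter (fun z => z ≠ y)).count ch = ys.count ch := by
          rw [List.count_filter]
          simp [hy]
        have hcc : List.count ch (y :: ys) = List.count ch ys := by
          simp [Ne.symm hy]
        rw [hcc, ← hcnt]
        simp only [List.length_cons] at hl
        exact ihn _ (le_trans (List.length_filter_le _ _) (by omega)) ch
          (List.mem_filter.mpr ⟨h, by simpa using hy⟩) hpres

theorem pvRunMax_cases (pres : List Char) :
    ∀ l, pvRunMax pres l = 0 ∨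
      ∃ ch ∈ l, ch ∈ pres ∧ pvRunMax pres l = (l.count ch : Int) := by
  suffices h : ∀ (n : Nat) (l : List Char), l.length ≤ n →
      pvRunMax pres l = 0 ∨ ∃ ch ∈ l, ch ∈ pres ∧ pvRunMax pres l = (l.count ch : Int) from
    fun l => h l.length l le_rfl
  intro n
  induction n with
  | zero =>
    intro l hl
    left
    rw [List.length_eq_zero_iff.mp (Nat.le_zero.mp hl), pvRunMax_nil]
  | succ n ihn =>
    intro l hl
    match l with
    | [] => left; rw [pvRunMax_nil]
    | y :: ys =>
      simp only [List.length_cons] at hl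
      have hX0 : (0 : Int) ≤ (if y ∈ pres then (1 + (ys.count y : Int)) else 0) := by
        split
        · have := Int.natCast_nonneg (ys.count y); omega
        · exact le_refl 0
      rcases max_cases (if y ∈ pres then (1 + (ys.count y : Int)) else 0)
          (pvRunMax pres (ys.filter (fun z => z ≠ y))) with ⟨heq, _⟩ | ⟨heq, hlt⟩
      · by_cases hy : y ∈ pres
        · right
          refine ⟨y, List.mem_cons_self, hy, ?_⟩
          rw [pvRunMax_cons, heq]
          simp only [hy, if_pos, List.count_cons_self]
          push_cast; ring
        · left
          rw [pvRunMax_cons, heq]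
          simp [hy]
      · rcases ihn (ys.filter (fun z => z ≠ y))
            (le_trans (List.length_filter_le _ _) (by omega)) with h0 | ⟨ch, hmem, hpres, hval⟩
        · exfalso
          rw [h0] at hlt
          omega
        · right
          have hch_ys : ch ∈ ys ∧ ch ≠ y := by
            have := List.mem_filter.mp hmem
            exact ⟨this.1, by simpa using this.2⟩
          refine ⟨ch, List.mem_cons_of_mem _ hch_ys.1, hpres, ?_⟩
          have h1 : (ys.filter (fun z => z ≠ y)).count ch = ys.count ch := by
            rw [List.count_filter]
            simp [hch_ys.2]
          have hcc : List.count ch (y :: ys) = List.count ch ys := by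
            simp [Ne.symm hch_ys.2]
          rw [pvRunMax_cons, heq, hval, h1, hcc]

-- master invariant for B's scan over a sorted list
theorem pv_scan (pres : List Char) :
    ∀ (l : List Char), l.Pairwise (· ≤ ·) →
    ∀ (b r : Int) (p : Option Char), 0 ≤ b →
      (∀ c, p = some c → (∀ y ∈ l, c ≤ y) ∧ (c ∈ pres → r ≤ b)) →
      (l.foldl (pvStep pres) (b, p, r)).1
        = max b (max (match p with
                      | none => 0
                      | some c => if c ∈ pres then r + (l.count c : Int) else 0)
                 (pvRunMax pres (match p with
                      | none => l
                      | some c => l.filter (fun z => z ≠ c)))) := by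
  intro l
  induction l with
  | nil =>
    intro _ b r p hb hp
    rcases p with _ | c
    · simp [pvRunMax_nil, max_eq_left hb]
    · by_cases hc : c ∈ pres
      · have hr : r ≤ b := (hp c rfl).2 hc
        simp only [List.foldl_nil, List.count_nil, List.filter_nil, Nat.cast_zero, add_zero,
          hc, if_pos, pvRunMax_nil]
        rw [max_eq_left (max_le hr hb)]
      · simp only [List.foldl_nil, List.filter_nil, hc, if_neg, pvRunMax_nil, not_false_iff]
        simp [max_eq_left hb]
  | cons y ys ih =>
    intro hsort b r p hb hp
    have hley : ∀ z ∈ ys, y ≤ z := (List.pairwise_cons.mp hsort).1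
    have hsort' : ys.Pairwise (· ≤ ·) := (List.pairwise_cons.mp hsort).2
    by_cases hcase : p = some y
    · -- continue the current run
      subst hcase
      have hcnd : (if (some y : Option Char) = some y then r + 1 else (1:Int)) = r + 1 := if_pos rfl
      have hbest : (if PySem.Set.contains pres y = true ∧ r + 1 > b then r + 1 else b)
          = (if y ∈ pres then max b (r + 1) else b) := by
        by_cases hy : y ∈ pres
        · rw [if_pos hy]
          by_cases h : r + 1 ≤ b
          · rw [if_neg (by rintro ⟨-, hgt⟩; omega), max_eq_left h]
          · have h' : b < r + 1 := lt_of_not_ge h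
            rw [if_pos ⟨(PySem.Set.contains_iff _ _).mpr hy, h'⟩, max_eq_right (le_of_lt h')]
        · rw [if_neg hy, if_neg (by rintro ⟨hcy, -⟩; exact hy ((PySem.Set.contains_iff _ _).mp hcy))]
      have hbody : pvStep pres (b, some y, r) y
          = ((if y ∈ pres then max b (r + 1) else b), some y, r + 1) :=
        calc pvStep pres (b, some y, r) y
            = ((if PySem.Set.contains pres y = true ∧ (if (some y : Option Char) = some y then r + 1 else (1:Int)) > b
                  then (if (some y : Option Char) = some y then r + 1 else (1:Int)) else b),
                (some y : Option Char),
                (if (some y : Option Char) = some y then r + 1 else (1:Int))) := rfl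
          _ = _ := by rw [hcnd, hbest]
      have hb' : 0 ≤ (if y ∈ pres then max b (r + 1) else b) := by
        split
        · exact le_trans hb (le_max_left _ _)
        · exact hb
      have hinv : ∀ c, (some y : Option Char) = some c →
          (∀ z ∈ ys, c ≤ z) ∧ (c ∈ pres → r + 1 ≤ (if y ∈ pres then max b (r + 1) else b)) := by
        intro c hc
        injection hc with hyc
        subst hyc
        exact ⟨hley, fun hy => by simp only [hy, if_pos]; exact le_max_right _ _⟩
      rw [List.foldl_cons, hbody, ih hsort' _ (r + 1) (some y) hb' hinv]
      dsimp only
      have hfil : (y :: ys).filter (fun z => z ≠ y) = ys.filter (fun z => z ≠ y) := by simp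
      rw [hfil]
      by_cases hy : y ∈ pres
      · simp only [hy, if_pos, List.count_cons_self]
        have hcnt : r + (((ys.count y + 1 : Nat)) : Int) = (r + 1) + (ys.count y : Int) := by
          push_cast; ring
        rw [hcnt]
        refine pv_max_absorb b (r + 1) _ ?_
        refine le_trans ?_ (le_max_left _ _)
        have := Int.natCast_nonneg (ys.count y); omega
      · simp only [hy, if_neg, not_false_iff]
    · -- a new run starts at y
      have hcnd : (if p = some y then r + 1 else (1:Int)) = 1 := if_neg hcase
      have hbest : (if PySem.Set.contains pres y = true ∧ (1:Int) > b then 1 else b)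
          = (if y ∈ pres then max b 1 else b) := by
        by_cases hy : y ∈ pres
        · rw [if_pos hy]
          by_cases h : (1 : Int) ≤ b
          · rw [if_neg (by rintro ⟨-, hgt⟩; omega), max_eq_left h]
          · have h' : b < 1 := lt_of_not_ge h
            rw [if_pos ⟨(PySem.Set.contains_iff _ _).mpr hy, h'⟩, max_eq_right (le_of_lt h')]
        · rw [if_neg hy, if_neg (by rintro ⟨hcy, -⟩; exact hy ((PySem.Set.contains_iff _ _).mp hcy))]
      have hbody : pvStep pres (b, p, r) y
          = ((if y ∈ pres then max b 1 else b), some y, 1) :=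
        calc pvStep pres (b, p, r) y
            = ((if PySem.Set.contains pres y = true ∧ (if p = some y then r + 1 else (1:Int)) > b
                  then (if p = some y then r + 1 else (1:Int)) else b),
                (some y : Option Char),
                (if p = some y then r + 1 else (1:Int))) := rfl
          _ = _ := by rw [hcnd, hbest]
      have hb' : 0 ≤ (if y ∈ pres then max b 1 else b) := by
        split
        · exact le_trans hb (le_max_left _ _)
        · exact hb
      have hinv : ∀ c, (some y : Option Char) = some c →
          (∀ z ∈ ys, c ≤ z) ∧ (c ∈ pres → 1 ≤ (if y ∈ pres then max b 1 else b)) := by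
        intro c hc
        injection hc with hyc
        subst hyc
        exact ⟨hley, fun hy => by simp only [hy, if_pos]; exact le_max_right _ _⟩
      rw [List.foldl_cons, hbody, ih hsort' _ 1 (some y) hb' hinv]
      dsimp only
      rw [← pvRunMax_cons]
      have habs : max (if y ∈ pres then max b 1 else b) (pvRunMax pres (y :: ys))
          = max b (pvRunMax pres (y :: ys)) := by
        by_cases hy : y ∈ pres
        · simp only [hy, if_pos]
          refine pv_max_absorb b 1 _ ?_
          rw [pvRunMax_cons]
          refine le_trans ?_ (le_max_left _ _)
          simp only [hy, if_pos]
          have := Int.natCast_nonneg (ys.count y); omega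
        · simp [hy]
      rw [habs]
      rcases p with _ | c
      · dsimp only
        rw [max_eq_right (pvRunMax_nonneg pres (y :: ys))]
      · dsimp only
        have hcy : c ≠ y := fun h => hcase (by rw [h])
        have hclt : ∀ z ∈ y :: ys, c < z := by
          intro z hz
          have hcylt : c < y := lt_of_le_of_ne ((hp c rfl).1 y List.mem_cons_self) hcy
          rcases List.mem_cons.mp hz with h | h
          · subst h; exact hcylt
          · exact lt_of_lt_of_le hcylt (hley z h)
        have hcount : ((y :: ys).count c) = 0 :=
          List.count_eq_zero.mpr (fun h => absurd rfl (ne_of_gt (hclt c h)))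
        have hfilter : (y :: ys).filter (fun z => z ≠ c) = y :: ys := by
          rw [List.filter_eq_self]
          intro z hz
          simpa using ne_of_gt (hclt z hz)
        have hmask : (if c ∈ pres then r + (((y :: ys).count c : Nat) : Int) else 0) ≤ b := by
          by_cases hc : c ∈ pres
          · simp only [hc, if_pos, hcount, Nat.cast_zero, add_zero]
            exact (hp c rfl).2 hc
          · simp [hc, hb]
        rw [hfilter, pv_max_drop b _ _ hmask]

-- generic facts about A's 'running max' fold
theorem pv_foldl_max_init (f : Char → Int) :
    ∀ (l : List Char) (init : Int), init ≤ l.foldl (fun b x => max b (f x)) init := by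
  intro l
  induction l with
  | nil => intro init; simp
  | cons y ys ih =>
    intro init
    exact le_trans (le_max_left _ (f y)) (ih _)

theorem pv_foldl_max_mem (f : Char → Int) :
    ∀ (l : List Char) (init : Int), ∀ x ∈ l, f x ≤ l.foldl (fun b x => max b (f x)) init := by
  intro l
  induction l with
  | nil => intro init x hx; simp at hx
  | cons y ys ih =>
    intro init x hx
    rcases List.mem_cons.mp hx with h | h
    · subst h
      exact le_trans (le_max_right init (f x)) (pv_foldl_max_init f ys _)
    · exact ih _ x h

theorem pv_foldl_max_cases (f : Char → Int) :
    ∀ (l : List Char) (init : Int),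
      l.foldl (fun b x => max b (f x)) init = init ∨
      ∃ x ∈ l, l.foldl (fun b x => max b (f x)) init = f x := by
  intro l
  induction l with
  | nil => intro init; left; rfl
  | cons y ys ih =>
    intro init
    rcases ih (max init (f y)) with h | ⟨x, hx, hv⟩
    · rcases max_cases init (f y) with ⟨heq, _⟩ | ⟨heq, _⟩
      · left; rw [List.foldl_cons, h, heq]
      · right; exact ⟨y, List.mem_cons_self, by rw [List.foldl_cons, h, heq]⟩
    · right; exact ⟨x, List.mem_cons_of_mem _ hx, by rw [List.foldl_cons, hv]⟩

-- the two summaries agree: running max over s1 of counts = run-max over sorted s2 masked by set(s1)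
theorem pv_bridge (s1chars s2chars : List Char) :
    s1chars.foldl (fun best ch => max best ((s2chars.count ch : Int))) 0
      = pvRunMax (PySem.Set.ofList s1chars)
          (PySem.List.sorted s2chars (fun c => c) false) := by
  have hperm : (PySem.List.sorted s2chars (fun c => c) false).Perm s2chars :=
    PySem.List.sorted_perm s2chars (fun c => c) false
  have hcnt : ∀ ch, (PySem.List.sorted s2chars (fun c => c) false).count ch = s2chars.count ch :=
    fun ch => hperm.count_eq ch
  apply le_antisymm
  · rcases pv_foldl_max_cases (fun ch => (s2chars.count ch : Int)) s1chars 0 with h | ⟨x, hx, hv⟩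
    · rw [h]; exact pvRunMax_nonneg _ _
    · rw [hv]
      by_cases hmem : x ∈ PySem.List.sorted s2chars (fun c => c) false
      · rw [← hcnt x]
        exact pvRunMax_ge _ _ x hmem ((PySem.Set.mem_ofList _ _).mpr hx)
      · rw [← hcnt x, List.count_eq_zero.mpr hmem]
        simpa using pvRunMax_nonneg (PySem.Set.ofList s1chars) (PySem.List.sorted s2chars (fun c => c) false)
  · rcases pvRunMax_cases (PySem.Set.ofList s1chars) (PySem.List.sorted s2chars (fun c => c) false)
        with h | ⟨ch, _, hchpres, hval⟩
    · rw [h]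
      exact pv_foldl_max_init _ s1chars 0
    · rw [hval, hcnt ch]
      exact pv_foldl_max_mem _ s1chars 0 ch ((PySem.Set.mem_ofList _ _).mp hchpres)

-- ===== VERDICT (by name: the statement is the Claim_ definition above) =====
theorem equal_char_spec : Claim_equal_equal_char := by
  intro s1 s2 _
  unfold Spec_equal_char equal_char equal_char_alt
  simp only [PySem.Str.len_eq]
  rw [pv_outer s2.toList s1.toList 0 le_rfl, pv_bridge s1.toList s2.toList]
  have hsorted : (PySem.List.sorted s2.toList (fun c => c) false).Pairwise (· ≤ ·) :=
    PySem.List.sorted_pairwise s2.toList (fun c => c)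
  rw [show ((PySem.List.sorted s2.toList (fun c => c) false).foldl
        (fun (st : Int × Option Char × Int) ch =>
          let run : Int := if st.2.1 = some ch then st.2.2 + 1 else 1
          let best : Int := if PySem.Set.contains (PySem.Set.ofList s1.toList) ch = true ∧ run > st.1 then run else st.1
          (best, some ch, run)) (0, none, 0)).1
      = ((PySem.List.sorted s2.toList (fun c => c) false).foldl
          (pvStep (PySem.Set.ofList s1.toList)) (0, none, 0)).1 from rfl]
  rw [pv_scan (PySem.Set.ofList s1.toList) _ hsorted 0 0 none le_rfl (by intro c hc; cases hc)]
  have h0 := pvRunMax_nonneg (PySem.Set.ofList s1.toList) (PySem.List.sorted s2.toList (fun c => c) false)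
  rw [max_eq_right h0, max_eq_right h0]
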